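-- pv_equiv track=rewrite | github.com/lukegre/netcdf-cf-coercer | src/nc_check/core.py | _normalize_attr_key_case
-- ===== SOURCE A (Python) =====
-- from copy import deepcopy
-- from typing import Any, Literal, TypeAlias, cast
--
-- def _normalize_attr_key_case(
--     attrs: dict[str, Any], expected_keys: tuple[str, ...]
-- ) -> dict[str, Any]:
--     normalized = deepcopy(attrs)
--     keys_in_order = list(normalized.keys())
--
--     for expected in expected_keys:
--         expected_lower = expected.lower()
--         matching_keys = [
--             key
--             for key in keys_in_order
--             if isinstance(key, str) and key.lower() == expected_lower
--         ]
--         if not matching_keys: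
--             continue
--
--         if expected in normalized:
--             for key in matching_keys:
--                 if key != expected:
--                     normalized.pop(key, None)
--             continue
--
--         source_key = next((key for key in matching_keys if key != expected), None)
--         if source_key is None:
--             continue
--         normalized[expected] = normalized[source_key]
--         for key in matching_keys:
--             if key != expected:
--                 normalized.pop(key, None)
--
--     return normalized
-- ===== SOURCE B (Python) =====
-- def _normalize_attr_key_case(attrs, expected_keys):
--     # canonical spelling for each lowercase key (first expected spelling wins)
--     canon = {}
--     for e in expected_keys:
--         canon.setdefault(e.lower(), e)
--     # value of the first attribute key for each lowercase spelling
--     first_by_lower = {}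
--     for k, v in attrs.items():
--         first_by_lower.setdefault(k.lower(), v)
--     # keep every key that is already its canonical spelling (or has none)
--     result = {k: v for k, v in attrs.items() if canon.get(k.lower(), k) == k}
--     # append each expected key whose spelling was absent but a case-variant present
--     for e in dict.fromkeys(expected_keys):
--         if e.lower() in first_by_lower and e not in attrs:
--             result[e] = first_by_lower[e.lower()]
--     return result
-- ===== Notes on version B (the rewrite author's own statement) =====
-- stated objective: faster
-- what changed: Instead of mutating a copy of the dict with a per-expected-key rescan of all attribute keys (pops plus re-insertion), B precomputes two hash maps (lowercase->canonical expected spelling, lowercase->first attribute value), keeps the surviving keys in one comprehension over the attrs, and appends the renamed expected keys in a second pass with O(1) lookups.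
import Mathlib
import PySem

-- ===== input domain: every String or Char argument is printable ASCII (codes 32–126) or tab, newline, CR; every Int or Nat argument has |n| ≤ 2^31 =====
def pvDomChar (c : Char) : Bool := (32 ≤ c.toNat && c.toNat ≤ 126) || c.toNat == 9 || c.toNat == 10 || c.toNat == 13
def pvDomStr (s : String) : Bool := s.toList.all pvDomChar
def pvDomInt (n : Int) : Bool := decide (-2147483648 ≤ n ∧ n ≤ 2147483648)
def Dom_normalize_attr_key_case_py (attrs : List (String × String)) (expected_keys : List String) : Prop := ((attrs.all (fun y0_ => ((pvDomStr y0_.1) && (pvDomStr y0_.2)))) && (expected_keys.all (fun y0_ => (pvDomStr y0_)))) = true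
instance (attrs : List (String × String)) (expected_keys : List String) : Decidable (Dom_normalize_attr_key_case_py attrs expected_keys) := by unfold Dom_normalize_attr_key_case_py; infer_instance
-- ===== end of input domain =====

-- B replaces A's per-expected-key rescan-and-mutate of a dict copy by two precomputed lowercase-keyed
-- maps, one comprehension keeping surviving keys, and one appending pass (objective: faster).

-- ===== PORT A =====
-- loop body of A's 'for expected in expected_keys' (the two identical 'for key in matching_keys: pop' loops kept inline)
def pvStepA (keys_in_order : List String) (normalized : PySem.Dict String String) (expected : String) : PySem.Dict String String :=
  let expected_lower := PySem.Str.lower expected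
  let matching_keys := keys_in_order.filter (fun key => PySem.Str.lower key == expected_lower)
  if matching_keys.isEmpty then normalized
  else if normalized.contains expected then
    matching_keys.foldl (fun n key => if key ≠ expected then n.erase key else n) normalized
  else
    match matching_keys.find? (fun key => !(key == expected)) with
    | none => normalized
    | some source_key =>
      let n := normalized.insert expected (normalized.getD source_key "")
      matching_keys.foldl (fun n key => if key ≠ expected then n.erase key else n) n

def normalize_attr_key_case_py (attrs : List (String × String)) (expected_keys : List String) : List (String × String) :=
  let normalized := PySem.Dict.ofList attrs      -- deepcopy(attrs)
  let keys_in_order := normalized.keys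
  (expected_keys.foldl (pvStepA keys_in_order) normalized).items

-- ===== PORT B =====
def normalize_attr_key_case_py_alt (attrs : List (String × String)) (expected_keys : List String) : List (String × String) :=
  let attrsD := PySem.Dict.ofList attrs
  -- canon: first expected spelling per lowercase key
  let canon := expected_keys.foldl (fun c e => c.setdefault (PySem.Str.lower e) e) PySem.Dict.empty
  -- first_by_lower: value of the first attribute key per lowercase spelling
  let first_by_lower := attrsD.items.foldl (fun f p => f.setdefault (PySem.Str.lower p.1) p.2) PySem.Dict.empty
  -- dict comprehension over the (distinct-keyed) items: keeps the surviving items in order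
  let result0 := PySem.Dict.mk (attrsD.items.filter (fun p => canon.getD (PySem.Str.lower p.1) p.1 == p.1))
  -- for e in dict.fromkeys(expected_keys): append the renamed keys
  let result := (PySem.List.dedup expected_keys).foldl (fun r e =>
      if first_by_lower.contains (PySem.Str.lower e) && !(attrsD.contains e) then
        r.insert e (first_by_lower.getD (PySem.Str.lower e) "")
      else r) result0
  result.items

-- ===== PRECONDITION & SPEC =====
-- Pre_ excludes expected_keys containing two DIFFERENT spellings with the same lowercase, where A may
-- raise KeyError on an already-popped source key or accidentally re-key an attribute into whichever
-- case-variant comes later; B keeps the first canonical spelling there.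
def Pre_normalize_attr_key_case_py (attrs : List (String × String)) (expected_keys : List String) : Prop :=
  List.Pairwise (fun a b => a ≠ b → PySem.Str.lower a ≠ PySem.Str.lower b) expected_keys
instance (attrs : List (String × String)) (expected_keys : List String) : Decidable (Pre_normalize_attr_key_case_py attrs expected_keys) := by unfold Pre_normalize_attr_key_case_py; infer_instance
def pvWitness_normalize_attr_key_case_py : (List (String × String)) × List String :=
  ([("UNITS", "m s-1"), ("other", "x")], ["units", "long_name"])

def Spec_normalize_attr_key_case_py (attrs : List (String × String)) (expected_keys : List String) (out : List (String × String)) : Prop := out = normalize_attr_key_case_py_alt attrs expected_keys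
instance (attrs : List (String × String)) (expected_keys : List String) (out : List (String × String)) : Decidable (Spec_normalize_attr_key_case_py attrs expected_keys out) := by unfold Spec_normalize_attr_key_case_py; infer_instance

-- ===== CLAIM (what is proved, stated in full; the proofs are below) =====
def Claim_equal_normalize_attr_key_case_py : Prop := ∀ (attrs : List (String × String)) (expected_keys : List String), Dom_normalize_attr_key_case_py attrs expected_keys → Pre_normalize_attr_key_case_py attrs expected_keys → Spec_normalize_attr_key_case_py attrs expected_keys (normalize_attr_key_case_py attrs expected_keys)

-- ===== LEMMAS AND PROOFS =====

-- closed form both ports are proved equal to: the surviving items of the dict (keys whose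
-- lowercase has no expected spelling, or already spelt canonically), then the renamed keys
def pvSurv (P : List String) (k : String) : Bool :=
  match P.find? (fun e => PySem.Str.lower e == PySem.Str.lower k) with
  | none => true
  | some e => e == k
def pvFval (d : PySem.Dict String String) (e : String) : String :=
  match d.items.find? (fun p => PySem.Str.lower p.1 == PySem.Str.lower e) with
  | some p => p.2
  | none => ""
def pvAppOK (d : PySem.Dict String String) (e : String) : Bool :=
  (d.keys.any (fun k => PySem.Str.lower k == PySem.Str.lower e)) && !(d.contains e)
def pvApp (d : PySem.Dict String String) (P : List String) : List (String × String) :=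
  ((PySem.List.dedup P).filter (pvAppOK d)).map (fun e => (e, pvFval d e))


theorem pvPopLoop_items (e : String) (M : List String) (s : PySem.Dict String String) :
    (M.foldl (fun n key => if key ≠ e then n.erase key else n) s).items
      = s.items.filter (fun p => p.1 == e || !(M.contains p.1)) := by
  induction M generalizing s with
  | nil => simp
  | cons k M' ih =>
    simp only [List.foldl_cons]
    by_cases hk : k = e
    · subst hk
      rw [if_neg (by simp), ih]
      apply List.filter_congr
      intro p _
      by_cases hp : p.1 = k <;> simp [hp]
    · rw [if_pos hk, ih]
      show (s.items.filter (fun p => !(p.1 == k))).filter _ = _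
      rw [List.filter_filter]
      apply List.filter_congr
      intro p _
      by_cases h1 : p.1 = e
      · simp [h1, Ne.symm hk]
      · by_cases h2 : p.1 = k <;> simp [h1, h2, hk]
theorem pvDedup_append (P : List String) (e : String) :
    PySem.List.dedup (P ++ [e])
      = if e ∈ P then PySem.List.dedup P else PySem.List.dedup P ++ [e] := by
  show PySem.Set.ofList (P ++ [e]) = _
  rw [PySem.Set.ofList_append]
  show PySem.Set.add (PySem.Set.ofList P) e = _
  unfold PySem.Set.add
  have hc : (PySem.Set.ofList P).contains e = true ↔ e ∈ P := by
    rw [PySem.Set.contains_iff, PySem.Set.mem_ofList]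
  by_cases he : e ∈ P
  · rw [if_pos (hc.mpr he), if_pos he]; rfl
  · rw [if_neg (fun h => he (hc.mp h)), if_neg he]
    rfl
theorem pvInv_nodup_keys (d : PySem.Dict String String) (hd : d.keys.Nodup) (P : List String)
    (s : PySem.Dict String String)
    (hs : s.items = d.items.filter (fun p => pvSurv P p.1) ++ pvApp d P) :
    s.keys.Nodup := by
  have hkeys : s.keys = (d.items.filter (fun p => pvSurv P p.1)).map (·.1)
      ++ (PySem.List.dedup P).filter (pvAppOK d) := by
    show s.items.map (·.1) = _
    rw [hs, List.map_append]
    congr 1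
    unfold pvApp
    rw [List.map_map]
    simp [Function.comp_def]
  rw [hkeys]
  apply List.Nodup.append
  · exact (List.Sublist.map _ (List.filter_sublist)).nodup hd
  · exact (PySem.List.nodup_dedup P).filter _
  · intro x hx1 hx2
    simp only [List.mem_map, List.mem_filter] at hx1 hx2
    obtain ⟨p, ⟨hpmem, _⟩, hpx⟩ := hx1
    obtain ⟨_, hok⟩ := hx2
    subst hpx
    unfold pvAppOK at hok
    rcases Bool.and_eq_true_iff.mp hok with ⟨_, h2⟩
    have hnc : d.contains p.1 = false := by simpa using h2
    have hmem : p.1 ∈ d.keys := List.mem_map_of_mem hpmem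
    rw [← PySem.Dict.contains_iff_mem_keys] at hmem
    rw [hnc] at hmem
    exact Bool.false_ne_true hmem
theorem pvSurv_step (P : List String) (e : String) (d : PySem.Dict String String)
    (hP : ∀ e' ∈ P, PySem.Str.lower e' = PySem.Str.lower e → e' = e)
    (k : String) (hk : k ∈ d.keys) :
    (pvSurv P k && (k == e || !((d.keys.filter (fun x => PySem.Str.lower x == PySem.Str.lower e)).contains k)))
      = pvSurv (P ++ [e]) k := by
  have hMk : ((d.keys.filter (fun x => PySem.Str.lower x == PySem.Str.lower e)).contains k = true)
      ↔ PySem.Str.lower k = PySem.Str.lower e := by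
    simp [List.mem_filter, hk]
  unfold pvSurv
  rw [List.find?_append]
  cases hf : P.find? (fun e' => PySem.Str.lower e' == PySem.Str.lower k) with
  | some e' =>
    simp only [Option.or_some]
    have he'P : e' ∈ P := List.mem_of_find?_eq_some hf
    have he'l : PySem.Str.lower e' = PySem.Str.lower k := by
      have := List.find?_some hf; simpa using this
    by_cases hek : e' = k
    · by_cases hke : k = e
      · simp [hek, hke]
      · have hne : ¬ PySem.Str.lower k = PySem.Str.lower e := by
          intro h
          exact hke (by rw [← hek]; exact hP _ he'P (by rw [hek]; exact h))
        simp [hek, hke, hMk, hne]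
    · simp [hek]
  | none =>
    simp only [Option.or_none, List.find?_cons, List.find?_nil]
    by_cases hle : PySem.Str.lower e = PySem.Str.lower k
    · have hb : (PySem.Str.lower e == PySem.Str.lower k) = true := by simpa using hle
      simp only [hb, Option.or_none]
      by_cases hke : k = e
      · simp [hke]
      · simp [hke, Ne.symm hke, hMk, hle.symm, hk]
    · have hb : (PySem.Str.lower e == PySem.Str.lower k) = false := by simpa using hle
      simp only [hb, Option.or_none]
      by_cases hke : k = e
      · simp [hke]
      · have hne : ¬ PySem.Str.lower k = PySem.Str.lower e := fun h => hle h.symm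
        simp [hke, hMk, hne]
theorem pvMem_pvApp (d : PySem.Dict String String) (P : List String) (p : String × String)
    (hp : p ∈ pvApp d P) :
    p.1 ∈ PySem.List.dedup P ∧ pvAppOK d p.1 = true ∧ p.2 = pvFval d p.1 := by
  unfold pvApp at hp
  obtain ⟨e, he, rfl⟩ := List.mem_map.mp hp
  obtain ⟨he1, he2⟩ := List.mem_filter.mp he
  exact ⟨he1, he2, rfl⟩

theorem pvApp_filter (d : PySem.Dict String String) (P : List String) (e : String) :
    (pvApp d P).filter
        (fun p => p.1 == e || !((d.keys.filter (fun x => PySem.Str.lower x == PySem.Str.lower e)).contains p.1))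
      = pvApp d P := by
  apply List.filter_eq_self.mpr
  intro p hp
  obtain ⟨-, hok, -⟩ := pvMem_pvApp d P p hp
  by_cases hpe : p.1 = e
  · simp [hpe]
  · have hnc : d.contains p.1 = false := by
      unfold pvAppOK at hok
      rcases Bool.and_eq_true_iff.mp hok with ⟨-, h2⟩
      simpa using h2
    have : p.1 ∉ d.keys := by
      rw [← PySem.Dict.contains_iff_mem_keys, hnc]; simp
    simp [List.mem_filter, hpe]
    exact Or.inl this
theorem pvFilter_step (d : PySem.Dict String String) (P : List String) (e : String)
    (hP : ∀ e' ∈ P, PySem.Str.lower e' = PySem.Str.lower e → e' = e) :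
    (d.items.filter (fun p => pvSurv P p.1)).filter
        (fun p => p.1 == e || !((d.keys.filter (fun x => PySem.Str.lower x == PySem.Str.lower e)).contains p.1))
      = d.items.filter (fun p => pvSurv (P ++ [e]) p.1) := by
  rw [List.filter_filter]
  apply List.filter_congr
  intro p hp
  rw [Bool.and_comm]
  exact pvSurv_step P e d hP p.1 (List.mem_map_of_mem hp)

theorem pvApp_step_skip (d : PySem.Dict String String) (P : List String) (e : String)
    (h : e ∈ P ∨ pvAppOK d e = false) :
    pvApp d (P ++ [e]) = pvApp d P := by
  unfold pvApp
  rw [pvDedup_append]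
  rcases h with h | h
  · rw [if_pos h]
  · by_cases heP : e ∈ P
    · rw [if_pos heP]
    · rw [if_neg heP, List.filter_append]
      simp [h]

theorem pvApp_step_add (d : PySem.Dict String String) (P : List String) (e : String)
    (heP : e ∉ P) (hok : pvAppOK d e = true) :
    pvApp d (P ++ [e]) = pvApp d P ++ [(e, pvFval d e)] := by
  unfold pvApp
  rw [pvDedup_append, if_neg heP, List.filter_append, List.map_append]
  simp [hok]

theorem pvMem_keys (d : PySem.Dict String String) (P : List String)
    (s : PySem.Dict String String)
    (hs : s.items = d.items.filter (fun p => pvSurv P p.1) ++ pvApp d P) (x : String) :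
    x ∈ s.keys ↔ (x ∈ d.keys ∧ pvSurv P x = true) ∨ (x ∈ PySem.List.dedup P ∧ pvAppOK d x = true) := by
  show x ∈ s.items.map (·.1) ↔ _
  rw [hs, List.map_append]
  simp only [List.mem_append, List.mem_map, List.mem_filter]
  constructor
  · rintro (⟨p, ⟨hp1, hp2⟩, rfl⟩ | ⟨p, hp, rfl⟩)
    · exact Or.inl ⟨List.mem_map_of_mem hp1, hp2⟩
    · obtain ⟨h1, h2, -⟩ := pvMem_pvApp d P p hp
      exact Or.inr ⟨h1, h2⟩
  · rintro (⟨hx, hsurv⟩ | ⟨hx, hok⟩)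
    · obtain ⟨p, hp, rfl⟩ := List.mem_map.mp hx
      exact Or.inl ⟨p, ⟨hp, hsurv⟩, rfl⟩
    · refine Or.inr ⟨(x, pvFval d x), ?_, rfl⟩
      unfold pvApp
      exact List.mem_map.mpr ⟨x, List.mem_filter.mpr ⟨hx, hok⟩, rfl⟩

theorem pvStepA_inv (d : PySem.Dict String String) (hd : d.keys.Nodup) (P : List String) (e : String)
    (s : PySem.Dict String String)
    (hP : ∀ e' ∈ P, PySem.Str.lower e' = PySem.Str.lower e → e' = e)
    (hs : s.items = d.items.filter (fun p => pvSurv P p.1) ++ pvApp d P) :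
    (pvStepA d.keys s e).items = d.items.filter (fun p => pvSurv (P ++ [e]) p.1) ++ pvApp d (P ++ [e]) := by
  have hnd : s.keys.Nodup := pvInv_nodup_keys d hd P s hs
  unfold pvStepA
  set M := d.keys.filter (fun key => PySem.Str.lower key == PySem.Str.lower e) with hM
  by_cases hMnil : M.isEmpty
  · rw [if_pos hMnil, hs]
    have hno : ∀ k ∈ d.keys, ¬ (PySem.Str.lower k = PySem.Str.lower e) := by
      intro k hk hlk
      have : k ∈ M := List.mem_filter.mpr ⟨hk, by simpa using hlk⟩
      rw [List.isEmpty_iff.mp hMnil] at this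
      exact List.not_mem_nil this
    congr 1
    · apply List.filter_congr
      intro p hp
      unfold pvSurv
      rw [List.find?_append]
      cases hf : P.find? (fun e' => PySem.Str.lower e' == PySem.Str.lower p.1) with
      | some e' => rfl
      | none =>
        have : (PySem.Str.lower e == PySem.Str.lower p.1) = false := by
          have := hno p.1 (List.mem_map_of_mem hp)
          simpa using fun h => this h.symm
        simp [this]
    · rw [pvApp_step_skip]
      right
      unfold pvAppOK
      have : d.keys.any (fun k => PySem.Str.lower k == PySem.Str.lower e) = false := by
        rw [List.any_eq_false]
        intro k hk
        simpa using hno k hk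
      simp [this]
  · rw [if_neg hMnil]
    by_cases hc : s.contains e
    · rw [if_pos hc]
      rw [pvPopLoop_items e M s, hs, List.filter_append, pvFilter_step d P e hP, pvApp_filter]
      congr 1
      rw [pvApp_step_skip]
      by_cases heP : e ∈ P
      · exact Or.inl heP
      · right
        have hmem := (pvMem_keys d P s hs e).mp ((PySem.Dict.contains_iff_mem_keys s e).mp hc)
        rcases hmem with ⟨hek, -⟩ | ⟨hedP, -⟩
        · unfold pvAppOK
          rw [(PySem.Dict.contains_iff_mem_keys d e).mpr hek]
          simp
        · exact absurd ((PySem.List.mem_dedup P e).mp hedP) heP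
    · rw [if_neg hc]
      have hcf : s.contains e = false := by simpa using hc
      -- e is not an original key
      have hed : e ∉ d.keys := by
        intro hek
        apply hc
        rw [PySem.Dict.contains_iff_mem_keys, pvMem_keys d P s hs e]
        left
        refine ⟨hek, ?_⟩
        unfold pvSurv
        cases hf : P.find? (fun e' => PySem.Str.lower e' == PySem.Str.lower e) with
        | none => rfl
        | some e' =>
          have he'P := List.mem_of_find?_eq_some hf
          have : e' = e := hP e' he'P (by simpa using List.find?_some hf)
          simp [this]
      have hany : d.keys.any (fun k => PySem.Str.lower k == PySem.Str.lower e) = true := by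
        cases hMc : M with
        | nil => rw [hMc] at hMnil; simp at hMnil
        | cons m M' =>
          have hmM : m ∈ M := by rw [hMc]; exact List.mem_cons_self
          obtain ⟨h1, h2⟩ := List.mem_filter.mp hmM
          exact List.any_eq_true.mpr ⟨m, h1, h2⟩
      have hok : pvAppOK d e = true := by
        unfold pvAppOK
        rw [hany]
        have : d.contains e = false := by
          rw [← Bool.not_eq_true, PySem.Dict.contains_iff_mem_keys]; exact hed
        simp [this]
      -- e was not appended before
      have heP : e ∉ P := by
        intro hePmem
        apply hc
        rw [PySem.Dict.contains_iff_mem_keys, pvMem_keys d P s hs e]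
        exact Or.inr ⟨(PySem.List.mem_dedup P e).mpr hePmem, hok⟩
      -- the first matching item
      cases hMc : M with
      | nil => rw [hMc] at hMnil; simp at hMnil
      | cons m M' =>
        have hmM : m ∈ M := by rw [hMc]; exact List.mem_cons_self
        have hmk : m ∈ d.keys := (List.mem_filter.mp hmM).1
        have hmne : ¬ (m == e) = true := by
          simp only [beq_iff_eq]
          intro h; exact hed (h ▸ hmk)
        have hfindM : M.find? (fun key => !(key == e)) = some m := by
          rw [hMc]
          exact List.find?_cons_of_pos (by simpa using hmne)
        rw [hfindM]
        -- head of the filtered items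
        have hMitems : M = (d.items.filter (fun p => PySem.Str.lower p.1 == PySem.Str.lower e)).map (·.1) := by
          rw [hM]
          show (d.items.map (·.1)).filter _ = _
          rw [List.filter_map]
          rfl
        have hfind : d.items.find? (fun p => PySem.Str.lower p.1 == PySem.Str.lower e)
            = (d.items.filter (fun p => PySem.Str.lower p.1 == PySem.Str.lower e)).head? :=
          Eq.symm List.head?_filter
        cases hFc : d.items.filter (fun p => PySem.Str.lower p.1 == PySem.Str.lower e) with
        | nil => rw [hFc] at hMitems; rw [hMc] at hMitems; simp at hMitems
        | cons pm rest =>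
          have hpm1 : pm.1 = m := by
            rw [hFc] at hMitems; rw [hMc] at hMitems
            simpa using (List.cons.injEq _ _ _ _ ▸ hMitems).1.symm
          have hfind' : d.items.find? (fun p => PySem.Str.lower p.1 == PySem.Str.lower e) = some pm := by
            rw [hfind, hFc]; rfl
          have hfval : pvFval d e = pm.2 := by unfold pvFval; rw [hfind']
          have hpmd : pm ∈ d.items := by
            have : pm ∈ d.items.filter (fun p => PySem.Str.lower p.1 == PySem.Str.lower e) := by
              rw [hFc]; exact List.mem_cons_self
            exact (List.mem_filter.mp this).1
          have hpml : PySem.Str.lower pm.1 = PySem.Str.lower e := by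
            have : pm ∈ d.items.filter (fun p => PySem.Str.lower p.1 == PySem.Str.lower e) := by
              rw [hFc]; exact List.mem_cons_self
            simpa using (List.mem_filter.mp this).2
          have hsurvm : pvSurv P pm.1 = true := by
            unfold pvSurv
            rw [List.find?_eq_none.mpr]
            intro e' he'
            simp only [beq_iff_eq]
            intro hl
            exact heP ((hP e' he' (hl.trans hpml)) ▸ he')
          have hpms : pm ∈ s.items := by
            rw [hs]
            exact List.mem_append_left _ (List.mem_filter.mpr ⟨hpmd, hsurvm⟩)
          have hv : s.getD m "" = pm.2 := by
            rw [← hpm1]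
            exact PySem.Dict.getD_of_mem_items s (by simpa using hpms) hnd ""
          show (M.foldl (fun n key => if key ≠ e then n.erase key else n)
                  (s.insert e (s.getD m ""))).items = _
          rw [hv]
          have hins : (s.insert e pm.2).items = s.items ++ [(e, pm.2)] :=
            PySem.Dict.items_insert_of_not_contains s pm.2 hcf
          rw [pvPopLoop_items e M _, hins, List.filter_append, hs, List.filter_append]
          rw [pvFilter_step d P e hP, pvApp_filter]
          have : [(e, pm.2)].filter
              (fun p => p.1 == e || !(M.contains p.1)) = [(e, pm.2)] := by
            simp
          rw [this, pvApp_step_add d P e heP hok, hfval, List.append_assoc]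
theorem pvA_loop (d : PySem.Dict String String) (hd : d.keys.Nodup) :
    ∀ (E P : List String) (s : PySem.Dict String String),
      List.Pairwise (fun a b => a ≠ b → PySem.Str.lower a ≠ PySem.Str.lower b) (P ++ E) →
      s.items = d.items.filter (fun p => pvSurv P p.1) ++ pvApp d P →
      (E.foldl (pvStepA d.keys) s).items
        = d.items.filter (fun p => pvSurv (P ++ E) p.1) ++ pvApp d (P ++ E) := by
  intro E
  induction E with
  | nil => intro P s _ hs; simpa using hs
  | cons e E' ih =>
    intro P s hpw hs
    have hP : ∀ e' ∈ P, PySem.Str.lower e' = PySem.Str.lower e → e' = e := by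
      intro e' he' hl
      by_contra hne
      have := (List.pairwise_append.mp hpw).2.2 e' he' e (List.mem_cons_self)
      exact this hne hl
    have hstep := pvStepA_inv d hd P e s hP hs
    have hpw' : List.Pairwise (fun a b => a ≠ b → PySem.Str.lower a ≠ PySem.Str.lower b)
        ((P ++ [e]) ++ E') := by
      rwa [List.append_assoc, List.singleton_append]
    have := ih (P ++ [e]) (pvStepA d.keys s e) hpw' hstep
    rw [List.foldl_cons, this, List.append_assoc, List.singleton_append]
theorem pvCanon_get? (E : List String) (l : String) :
    ∀ (c0 : PySem.Dict String String),
    (E.foldl (fun c e => c.setdefault (PySem.Str.lower e) e) c0).get? l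
      = (c0.get? l).or (E.find? (fun e => PySem.Str.lower e == l)) := by
  induction E with
  | nil => intro c0; simp
  | cons e E' ih =>
    intro c0
    rw [List.foldl_cons, ih]
    by_cases hl : l = PySem.Str.lower e
    · subst hl
      rw [PySem.Dict.get?_setdefault_self]
      simp only [List.find?_cons, beq_self_eq_true]
      cases hg : c0.get? (PySem.Str.lower e) <;> simp
    · rw [PySem.Dict.get?_setdefault_of_ne c0 e hl]
      have : (PySem.Str.lower e == l) = false := by
        simpa using fun h => hl h.symm
      simp [this]

theorem pvFbl_get? (L : List (String × String)) (l : String) :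
    ∀ (c0 : PySem.Dict String String),
    (L.foldl (fun f p => f.setdefault (PySem.Str.lower p.1) p.2) c0).get? l
      = (c0.get? l).or ((L.find? (fun p => PySem.Str.lower p.1 == l)).map (·.2)) := by
  induction L with
  | nil => intro c0; simp
  | cons p L' ih =>
    intro c0
    rw [List.foldl_cons, ih]
    by_cases hl : l = PySem.Str.lower p.1
    · subst hl
      rw [PySem.Dict.get?_setdefault_self]
      simp only [List.find?_cons, beq_self_eq_true]
      cases hg : c0.get? (PySem.Str.lower p.1) <;> simp
    · rw [PySem.Dict.get?_setdefault_of_ne c0 p.2 hl]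
      have : (PySem.Str.lower p.1 == l) = false := by
        simpa using fun h => hl h.symm
      simp [this]

theorem pvFoldl_insert_if_items (cond : String → Bool) (val : String → String) :
    ∀ (L : List String) (r : PySem.Dict String String), L.Nodup →
      (∀ e ∈ L, cond e = true → r.contains e = false) →
      (L.foldl (fun r e => if cond e then r.insert e (val e) else r) r).items
        = r.items ++ (L.filter cond).map (fun e => (e, val e)) := by
  intro L
  induction L with
  | nil => intro r _ _; simp
  | cons e L' ih =>
    intro r hnd hfresh
    rw [List.foldl_cons]
    by_cases hce : cond e
    · rw [if_pos hce]
      have hins : (r.insert e (val e)).items = r.items ++ [(e, val e)] :=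
        PySem.Dict.items_insert_of_not_contains r (val e) (hfresh e List.mem_cons_self hce)
      rw [ih (r.insert e (val e)) (List.nodup_cons.mp hnd).2 ?_, hins]
      · simp [hce]
      · intro x hx hcx
        have hxe : ¬ (x == e) = true := by
          simp only [beq_iff_eq]
          intro h
          exact (List.nodup_cons.mp hnd).1 (h ▸ hx)
        rw [PySem.Dict.contains_insert]
        simp only [Bool.or_eq_false_iff]
        exact ⟨by simpa using hxe, hfresh x (List.mem_cons_of_mem _ hx) hcx⟩
    · rw [if_neg hce, ih r (List.nodup_cons.mp hnd).2
        (fun x hx hcx => hfresh x (List.mem_cons_of_mem _ hx) hcx)]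
      simp [hce]

theorem pvB_closed (attrs : List (String × String)) (expected_keys : List String) :
    normalize_attr_key_case_py_alt attrs expected_keys
      = (PySem.Dict.ofList attrs).items.filter (fun p => pvSurv expected_keys p.1)
        ++ pvApp (PySem.Dict.ofList attrs) expected_keys := by
  set d := PySem.Dict.ofList attrs with hdd
  simp only [normalize_attr_key_case_py_alt]
  set canon := expected_keys.foldl (fun c e => c.setdefault (PySem.Str.lower e) e) PySem.Dict.empty with hcanon
  set fbl := d.items.foldl (fun f p => f.setdefault (PySem.Str.lower p.1) p.2) PySem.Dict.empty with hfbl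
  have hcanon_get : ∀ l, canon.get? l = expected_keys.find? (fun e => PySem.Str.lower e == l) := by
    intro l
    rw [hcanon, pvCanon_get?]
    simp
  have hfbl_get : ∀ l, fbl.get? l
      = (d.items.find? (fun p => PySem.Str.lower p.1 == l)).map (·.2) := by
    intro l
    rw [hfbl, pvFbl_get?]
    simp
  have hfilter : d.items.filter (fun p => canon.getD (PySem.Str.lower p.1) p.1 == p.1)
      = d.items.filter (fun p => pvSurv expected_keys p.1) := by
    apply List.filter_congr
    intro p _
    rw [PySem.Dict.getD_eq_get?_getD, hcanon_get]
    unfold pvSurv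
    cases expected_keys.find? (fun e => PySem.Str.lower e == PySem.Str.lower p.1) <;> simp
  have hcond : ∀ e, (fbl.contains (PySem.Str.lower e) && !(d.contains e)) = pvAppOK d e := by
    intro e
    unfold pvAppOK
    congr 1
    rw [PySem.Dict.contains_eq_isSome_get?, hfbl_get]
    rw [Option.isSome_map]
    show _ = (d.items.map (·.1)).any (fun k => PySem.Str.lower k == PySem.Str.lower e)
    rw [List.any_map]
    cases hh : d.items.find? (fun p => PySem.Str.lower p.1 == PySem.Str.lower e) with
    | none =>
      symm
      show List.any _ _ = false
      rw [List.any_eq_false]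
      intro p hp
      exact (List.find?_eq_none.mp hh) p hp
    | some pm =>
      symm
      show List.any _ _ = true
      rw [List.any_eq_true]
      exact ⟨pm, List.mem_of_find?_eq_some hh, List.find?_some hh⟩
  have hval : ∀ e, fbl.getD (PySem.Str.lower e) "" = pvFval d e := by
    intro e
    rw [PySem.Dict.getD_eq_get?_getD, hfbl_get]
    unfold pvFval
    cases d.items.find? (fun p => PySem.Str.lower p.1 == PySem.Str.lower e) <;> simp
  have hfresh : ∀ e ∈ PySem.List.dedup expected_keys,
      (fbl.contains (PySem.Str.lower e) && !(d.contains e)) = true →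
      (PySem.Dict.mk (d.items.filter (fun p => canon.getD (PySem.Str.lower p.1) p.1 == p.1))).contains e = false := by
    intro e _ hce
    rcases Bool.and_eq_true_iff.mp hce with ⟨-, h2⟩
    have hdc : d.contains e = false := by simpa using h2
    rw [← Bool.not_eq_true]
    intro hcont
    have : ∃ p ∈ d.items.filter (fun p => canon.getD (PySem.Str.lower p.1) p.1 == p.1), p.1 == e := by
      simpa [PySem.Dict.contains] using hcont
    obtain ⟨p, hpmem, hpe⟩ := this
    have hpd : p ∈ d.items := (List.mem_filter.mp hpmem).1
    have : d.contains e = true := by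
      unfold PySem.Dict.contains
      exact List.any_eq_true.mpr ⟨p, hpd, hpe⟩
    rw [hdc] at this
    exact Bool.false_ne_true this
  rw [pvFoldl_insert_if_items _ _ (PySem.List.dedup expected_keys) _
      (PySem.List.nodup_dedup _) hfresh]
  show (d.items.filter (fun p => canon.getD (PySem.Str.lower p.1) p.1 == p.1)) ++ _ = _
  rw [hfilter]
  congr 1
  unfold pvApp
  have h1 : (PySem.List.dedup expected_keys).filter
      (fun e => fbl.contains (PySem.Str.lower e) && !(d.contains e))
      = (PySem.List.dedup expected_keys).filter (pvAppOK d) := by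
    apply List.filter_congr
    intro e _
    exact hcond e
  rw [h1]
  apply List.map_congr_left
  intro e _
  rw [hval e]

-- ===== VERDICT (by name: the statement is the Claim_ definition above) =====
theorem normalize_attr_key_case_py_spec : Claim_equal_normalize_attr_key_case_py := by
  intro attrs expected_keys _hdom hpre
  unfold Spec_normalize_attr_key_case_py
  rw [pvB_closed]
  show (expected_keys.foldl (pvStepA (PySem.Dict.ofList attrs).keys) (PySem.Dict.ofList attrs)).items = _
  have hd : (PySem.Dict.ofList attrs).keys.Nodup := PySem.Dict.nodup_keys_ofList attrs
  have hbase : (PySem.Dict.ofList attrs).items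
      = (PySem.Dict.ofList attrs).items.filter (fun p => pvSurv [] p.1)
        ++ pvApp (PySem.Dict.ofList attrs) [] := by
    simp [pvApp, pvSurv, PySem.List.dedup]
  have h := pvA_loop (PySem.Dict.ofList attrs) hd expected_keys [] (PySem.Dict.ofList attrs)
    (by simpa using hpre) hbase
  simpa using h
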